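-- pv_equiv track=rewrite | github.com/maxtuno/PEQNP | peqnp/sdk/stdlib.py | hyper_loop
-- ===== SOURCE A (Python) =====
-- def hyper_loop(n, m):
--     """
--     An nested for loop
--     :param n: The size of the samples
--     :param m: The numbers in the sample 0..m
--     :return:
--     """
--     idx = []
--     for k in range(m ** n):
--         for _ in range(n):
--             idx.append(k % m)
--             k //= m
--             if len(idx) == n:
--                 yield idx[::-1]
--                 del idx[:]
-- ===== SOURCE B (Python) =====
-- def hyper_loop(n, m):
--     """
--     An nested for loop
--     :param n: The size of the samples
--     :param m: The numbers in the sample 0..m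
--     :return:
--     """
--     if n == 0 or m <= 0:
--         return
--     digits = [0] * n
--     while True:
--         yield list(digits)
--         i = n - 1
--         while i >= 0 and digits[i] == m - 1:
--             digits[i] = 0
--             i -= 1
--         if i < 0:
--             return
--         digits[i] += 1
-- ===== Notes on version B (the rewrite author's own statement) =====
-- stated objective: alternative
-- what changed: B replaces A's per-index reconstruction (for each counter k, n repeated divmods k%m, k//=m) by an odometer that keeps one running digit array, yields a copy and increments it in place with leftward carry propagation.
-- intended difference: For m < 0 and even n >= 1 (so m**n > 0), A enumerates floor-division 'digits' of a negative base, e.g. [[0,0],[-1,-1],[-1,0],[0,-1]] for (2,-2); B yields nothing, the intended enumeration of the empty digit range 0..m-1. — e.g. on hyper_loop(2, -2): A returns [[0, 0], [-1, -1], [-1, 0], [0, -1]], B returns []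
import Mathlib
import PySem

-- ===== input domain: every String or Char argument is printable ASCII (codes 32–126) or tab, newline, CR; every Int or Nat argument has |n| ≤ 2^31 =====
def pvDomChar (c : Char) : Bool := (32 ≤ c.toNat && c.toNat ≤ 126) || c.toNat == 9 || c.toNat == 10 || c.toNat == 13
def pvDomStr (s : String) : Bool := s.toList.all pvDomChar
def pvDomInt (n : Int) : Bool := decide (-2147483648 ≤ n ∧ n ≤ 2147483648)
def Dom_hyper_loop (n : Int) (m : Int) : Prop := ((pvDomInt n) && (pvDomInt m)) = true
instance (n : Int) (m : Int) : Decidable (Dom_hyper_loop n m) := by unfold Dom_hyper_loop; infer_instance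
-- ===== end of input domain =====

-- B is an odometer over a running digit array instead of A's per-k divmod reconstruction (objective: alternative
-- decomposition, same cost). Both are generators; the equivalence is about the list of yielded values.

-- ===== PORT A =====
-- Literal port of A. State of the outer loop: (idx, out); state of the inner loop: (idx, k, out).
-- 'idx[::-1]' is List.reverse; for n < 0 Python's m ** n leaves Int (float / ZeroDivisionError), excluded by Pre_.
def hyper_loop (n : Int) (m : Int) : List (List Int) :=
  if n < 0 then []
  else
    ((PySem.List.pyRange 0 (m ^ n.toNat) 1).foldl
      (fun (st : List Int × List (List Int)) k =>
        let inner :=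
          (List.range n.toNat).foldl
            (fun (s : List Int × Int × List (List Int)) _ =>
              let idx := s.1 ++ [PySem.Int.mod s.2.1 m]
              let k' := PySem.Int.floordiv s.2.1 m
              if idx.length = n.toNat then ([], k', s.2.2 ++ [idx.reverse])
              else (idx, k', s.2.2))
            (st.1, k, st.2)
        (inner.1, inner.2.2))
      ([], [])).2

-- ===== PORT B =====
-- Source B's inner while loop (scan from the last digit leftwards, zeroing maxed digits and bumping the first
-- non-maxed one; none = overall overflow) as structural recursion on the REVERSED (least-significant-first) digits.
def hlIncr (m : Int) : List Int → Option (List Int)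
  | [] => none
  | d :: rest => if d = m - 1 then (hlIncr m rest).map (fun r => 0 :: r) else some ((d + 1) :: rest)

-- Source B's outer while loop; the state is kept least-significant-first and each yield is its reverse
-- (= Python's big-endian 'list(digits)'); fuel only makes the loop total, it is never exhausted early.
def hlLoop (m : Int) : Nat → List Int → List (List Int)
  | 0, _ => []
  | fuel + 1, ds =>
      ds.reverse ::
        (match hlIncr m ds with
         | none => []
         | some r => hlLoop m fuel r)

def hyper_loop_alt (n : Int) (m : Int) : List (List Int) :=
  if n = 0 ∨ m ≤ 0 then []
  else hlLoop m (m.toNat ^ n.toNat) (List.replicate n.toNat 0)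

-- ===== PRECONDITION & SPEC =====
-- Pre_ excludes exactly n < 0, where Python's m ** n is a float (or ZeroDivisionError for m = 0) and A raises.
def Pre_hyper_loop (n : Int) (_m : Int) : Prop := 0 ≤ n
instance (n : Int) (m : Int) : Decidable (Pre_hyper_loop n m) := by unfold Pre_hyper_loop; infer_instance
def pvWitness_hyper_loop : Int × Int := (2, 2)

-- For m < 0 and even n ≥ 1 (so m**n > 0), A returns floor-division 'digits' of a negative base
-- (e.g. [[0,0],[-1,-1],[-1,0],[0,-1]] for (2,-2)); B yields nothing, the intended enumeration of the
-- empty digit range 0..m-1.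
def D_hyper_loop (n : Int) (m : Int) : Prop := m < 0 ∧ 1 ≤ n ∧ n % 2 = 0
instance (n : Int) (m : Int) : Decidable (D_hyper_loop n m) := by unfold D_hyper_loop; infer_instance

def Spec_hyper_loop (n : Int) (m : Int) (out : List (List Int)) : Prop :=
  ¬ D_hyper_loop n m → out = hyper_loop_alt n m
instance (n : Int) (m : Int) (out : List (List Int)) : Decidable (Spec_hyper_loop n m out) := by
  unfold Spec_hyper_loop; infer_instance

def pvDiffWitness_hyper_loop : Int × Int := (2, -2)
def pvDiffWitnessOut_hyper_loop : (List (List Int)) × (List (List Int)) :=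
  ([[0, 0], [-1, -1], [-1, 0], [0, -1]], [])

-- ===== CLAIM (what is proved, stated in full; the proofs are below) =====
def Claim_unchanged_hyper_loop : Prop := ∀ (n : Int) (m : Int), Dom_hyper_loop n m → Pre_hyper_loop n m → Spec_hyper_loop n m (hyper_loop n m)
def Claim_changed_hyper_loop : Prop := Dom_hyper_loop (pvDiffWitness_hyper_loop.1) (pvDiffWitness_hyper_loop.2) ∧ Pre_hyper_loop (pvDiffWitness_hyper_loop.1) (pvDiffWitness_hyper_loop.2) ∧ D_hyper_loop (pvDiffWitness_hyper_loop.1) (pvDiffWitness_hyper_loop.2) ∧ hyper_loop (pvDiffWitness_hyper_loop.1) (pvDiffWitness_hyper_loop.2) = pvDiffWitnessOut_hyper_loop.1 ∧ hyper_loop_alt (pvDiffWitness_hyper_loop.1) (pvDiffWitness_hyper_loop.2) = pvDiffWitnessOut_hyper_loop.2 ∧ pvDiffWitnessOut_hyper_loop.1 ≠ pvDiffWitnessOut_hyper_loop.2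
def Claim_exact_hyper_loop : Prop := ∀ (n : Int) (m : Int), Dom_hyper_loop n m → Pre_hyper_loop n m → D_hyper_loop n m → hyper_loop n m ≠ hyper_loop_alt n m

-- ===== LEMMAS AND PROOFS =====

-- little-endian floor-division digits of k: what A's inner loop appends for one value of k
def aDigits (m : Int) : Nat → Int → List Int
  | 0, _ => []
  | j + 1, k => PySem.Int.mod k m :: aDigits m j (PySem.Int.floordiv k m)


-- peel one foldl step when the new state is known
lemma foldl_cons_state {α β : Type} (f : α → β → α) (x : β) (l : List β) (s s' : α)
    (hs : f s x = s') : (x :: l).foldl f s = l.foldl f s' := by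
  rw [List.foldl_cons, hs]

-- A's inner loop, run to completion for one value of k: appends the little-endian digits of k and,
-- exactly at length nn, flushes the reversed tuple.
lemma inner_run (m : Int) (nn : Nat) (l : List Nat) :
    ∀ (idx : List Int) (k : Int) (out : List (List Int)),
      idx.length + l.length = nn → 1 ≤ l.length →
      ∃ k', l.foldl
          (fun (s : List Int × Int × List (List Int)) _ =>
            let idx := s.1 ++ [PySem.Int.mod s.2.1 m]
            let k' := PySem.Int.floordiv s.2.1 m
            if idx.length = nn then ([], k', s.2.2 ++ [idx.reverse])
            else (idx, k', s.2.2)) (idx, k, out)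
        = ([], k', out ++ [(idx ++ aDigits m l.length k).reverse]) := by
  induction l with
  | nil => intro idx k out _ h1; simp at h1
  | cons a t ih =>
    intro idx k out h h1
    cases t with
    | nil =>
      refine ⟨PySem.Int.floordiv k m, ?_⟩
      simp only [List.length_cons, List.length_nil, Nat.zero_add] at h
      simp [List.foldl_cons, List.foldl_nil, aDigits, h]
    | cons b t' =>
      have hlen : idx.length + 1 ≠ nn := by
        simp at h; omega
      obtain ⟨k', hk'⟩ := ih (idx ++ [PySem.Int.mod k m]) (PySem.Int.floordiv k m) out
        (by simp at h ⊢; omega) (by simp)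
      refine ⟨k', ?_⟩
      have hstep : (fun (s : List Int × Int × List (List Int)) _ =>
            let idx := s.1 ++ [PySem.Int.mod s.2.1 m]
            let k' := PySem.Int.floordiv s.2.1 m
            if idx.length = nn then ([], k', s.2.2 ++ [idx.reverse])
            else (idx, k', s.2.2)) (idx, k, out) a
          = ((idx ++ [PySem.Int.mod k m]), PySem.Int.floordiv k m, out) := by
        simp [hlen]
      rw [foldl_cons_state _ _ _ _ _ hstep, hk']
      simp [aDigits]

-- A's outer loop: the idx accumulator is empty at the start of every iteration, and each k
-- contributes exactly the reversed digit tuple of k.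
lemma outer_run (m : Int) (nn : Nat) (h1 : 1 ≤ nn) (ks : List Int) :
    ∀ (out : List (List Int)),
      ks.foldl
        (fun (st : List Int × List (List Int)) k =>
          let inner :=
            (List.range nn).foldl
              (fun (s : List Int × Int × List (List Int)) _ =>
                let idx := s.1 ++ [PySem.Int.mod s.2.1 m]
                let k' := PySem.Int.floordiv s.2.1 m
                if idx.length = nn then ([], k', s.2.2 ++ [idx.reverse])
                else (idx, k', s.2.2))
              (st.1, k, st.2)
          (inner.1, inner.2.2)) ([], out)
        = ([], out ++ ks.map (fun k => (aDigits m nn k).reverse)) := by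
  induction ks with
  | nil => intro out; simp
  | cons a ks ih =>
    intro out
    obtain ⟨k', hk'⟩ := inner_run m nn (List.range nn) [] a out (by simp) (by simpa)
    have hstep : (fun (st : List Int × List (List Int)) k =>
          let inner :=
            (List.range nn).foldl
              (fun (s : List Int × Int × List (List Int)) _ =>
                let idx := s.1 ++ [PySem.Int.mod s.2.1 m]
                let k' := PySem.Int.floordiv s.2.1 m
                if idx.length = nn then ([], k', s.2.2 ++ [idx.reverse])
                else (idx, k', s.2.2))
              (st.1, k, st.2)
          (inner.1, inner.2.2)) (([] : List Int), out) a
        = (([] : List Int), out ++ [(aDigits m nn a).reverse]) := by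
      simp only []
      rw [hk']
      simp
    rw [foldl_cons_state _ _ _ _ _ hstep, ih (out ++ [(aDigits m nn a).reverse])]
    simp

-- characterisation of A for n ≥ 1 (any m)
lemma hyper_loop_eq_map (n m : Int) (hn : 1 ≤ n) :
    hyper_loop n m
      = (PySem.List.pyRange 0 (m ^ n.toNat) 1).map (fun k => (aDigits m n.toNat k).reverse) := by
  unfold hyper_loop
  rw [if_neg (by omega)]
  rw [outer_run m n.toNat (by omega)]
  simp

lemma aDigits_zero (m : Int) (hm : 0 < m) : ∀ j, aDigits m j 0 = List.replicate j 0 := by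
  intro j
  induction j with
  | zero => rfl
  | succ j ih =>
    show PySem.Int.mod 0 m :: aDigits m j (PySem.Int.floordiv 0 m) = _
    rw [PySem.Int.mod_eq_emod_of_pos hm, PySem.Int.floordiv_eq_ediv_of_pos hm]
    simp [ih, List.replicate_succ]

-- hlIncr is the successor on little-endian base-m digit lists (overflow = none)
lemma hlIncr_aDigits (m : Int) (hm : 0 < m) :
    ∀ (j : Nat) (k : Int), 0 ≤ k → k + 1 ≤ m ^ j →
      hlIncr m (aDigits m j k)
        = if k + 1 = m ^ j then none else some (aDigits m j (k + 1)) := by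
  intro j
  induction j with
  | zero =>
    intro k hk h1
    have h1' : k + 1 ≤ 1 := by simpa using h1
    have hk0 : k = 0 := by omega
    subst hk0
    simp [aDigits, hlIncr]
  | succ j ih =>
    intro k hk h1
    have hmod : 0 ≤ k % m := Int.emod_nonneg k (ne_of_gt hm)
    have hmodlt : k % m < m := Int.emod_lt_of_pos k hm
    have hdiv : m * (k / m) + k % m = k := Int.mul_ediv_add_emod k m
    have hdge : 0 ≤ k / m := Int.ediv_nonneg hk (le_of_lt hm)
    rw [show aDigits m (j + 1) k
        = PySem.Int.mod k m :: aDigits m j (PySem.Int.floordiv k m) from rfl,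
      PySem.Int.mod_eq_emod_of_pos hm, PySem.Int.floordiv_eq_ediv_of_pos hm]
    rw [show hlIncr m (k % m :: aDigits m j (k / m))
        = if k % m = m - 1 then (hlIncr m (aDigits m j (k / m))).map (fun r => 0 :: r)
          else some ((k % m + 1) :: aDigits m j (k / m)) from rfl]
    by_cases hc : k % m = m - 1
    · have hk1 : k + 1 = m * (k / m + 1) := by
        have := hdiv; rw [hc] at this
        have hexp : m * (k / m + 1) = m * (k / m) + m := by ring
        omega
      have hb : k / m + 1 ≤ m ^ j := by
        have hmm : m * (k / m + 1) ≤ m * m ^ j := by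
          rw [← hk1]; calc k + 1 ≤ m ^ (j + 1) := h1
            _ = m * m ^ j := by ring
        exact le_of_mul_le_mul_left hmm hm
      rw [if_pos hc, ih (k / m) hdge hb]
      by_cases he : k / m + 1 = m ^ j
      · rw [if_pos he, if_pos (by rw [hk1, he]; ring)]
        rfl
      · rw [if_neg he, if_neg (fun hcon => he (mul_left_cancel₀ (ne_of_gt hm)
          (by rw [← hk1, hcon]; ring)))]
        have h0 : (k + 1) % m = 0 := by rw [hk1]; exact Int.mul_emod_right m _
        have hq : (k + 1) / m = k / m + 1 := by
          rw [hk1]; exact Int.mul_ediv_cancel_left _ (ne_of_gt hm)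
        rw [show aDigits m (j + 1) (k + 1)
            = PySem.Int.mod (k + 1) m :: aDigits m j (PySem.Int.floordiv (k + 1) m) from rfl,
          PySem.Int.mod_eq_emod_of_pos hm, PySem.Int.floordiv_eq_ediv_of_pos hm, h0, hq]
        simp
    · have key : (k + 1) / m = k / m ∧ (k + 1) % m = k % m + 1 := by
        rw [Int.ediv_emod_unique'' (ne_of_gt hm)]
        refine ⟨by omega, by omega, ?_⟩
        rw [abs_of_pos hm]; omega
      obtain ⟨hq, hr⟩ := key
      rw [if_neg hc, if_neg (fun hcon => by
        have h0 : (k + 1) % m = 0 := by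
          rw [hcon, pow_succ]; exact Int.mul_emod_left _ _
        omega)]
      rw [show aDigits m (j + 1) (k + 1)
          = PySem.Int.mod (k + 1) m :: aDigits m j (PySem.Int.floordiv (k + 1) m) from rfl,
        PySem.Int.mod_eq_emod_of_pos hm, PySem.Int.floordiv_eq_ediv_of_pos hm, hq, hr]

-- B's outer loop, started at k, emits the digit tuples of k, k+1, …, m^nn - 1
lemma hlLoop_char (m : Int) (hm : 0 < m) (nn : Nat) :
    ∀ (c : Nat) (k : Int), 0 ≤ k → k + (c : Int) = m ^ nn →
      hlLoop m c (aDigits m nn k)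
        = (PySem.List.pyRange k (m ^ nn) 1).map (fun t => (aDigits m nn t).reverse) := by
  intro c
  induction c with
  | zero =>
    intro k hk h
    rw [show hlLoop m 0 (aDigits m nn k) = [] from rfl]
    rw [PySem.List.pyRange_one]
    simp at h
    rw [← h]
    simp
  | succ c ih =>
    intro k hk h
    rw [show hlLoop m (c + 1) (aDigits m nn k)
        = (aDigits m nn k).reverse ::
            (match hlIncr m (aDigits m nn k) with
             | none => []
             | some r => hlLoop m c r) from rfl]
    rw [hlIncr_aDigits m hm nn k hk (by push_cast at h; omega)]
    rw [PySem.List.pyRange_one_cons (show k < m ^ nn from by push_cast at h; omega)]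
    by_cases he : k + 1 = m ^ nn
    · rw [if_pos he]
      have hc0 : c = 0 := by push_cast at h; omega
      subst hc0
      rw [← he]
      rw [show PySem.List.pyRange (k + 1) (k + 1) 1 = [] from by
        rw [PySem.List.pyRange_one]; simp]
      simp
    · rw [if_neg he]
      rw [show (match some (aDigits m nn (k + 1)) with
           | none => ([] : List (List Int))
           | some r => hlLoop m c r) = hlLoop m c (aDigits m nn (k + 1)) from rfl]
      rw [ih (k + 1) (by omega) (by push_cast at h ⊢; omega)]
      simp

-- characterisation of B for n ≥ 1, m ≥ 1
lemma alt_eq_map (n m : Int) (hn : 1 ≤ n) (hm : 0 < m) :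
    hyper_loop_alt n m
      = (PySem.List.pyRange 0 (m ^ n.toNat) 1).map (fun k => (aDigits m n.toNat k).reverse) := by
  unfold hyper_loop_alt
  rw [if_neg (by omega)]
  rw [← aDigits_zero m hm n.toNat]
  rw [hlLoop_char m hm n.toNat (m.toNat ^ n.toNat) 0 le_rfl (by
    push_cast
    rw [Int.toNat_of_nonneg (le_of_lt hm)]
    ring)]

lemma alt_nonpos (n m : Int) (hm : m ≤ 0) : hyper_loop_alt n m = [] := by
  unfold hyper_loop_alt
  rw [if_pos (Or.inr hm)]

-- ===== VERDICT (by name: the statement is the Claim_ definition above) =====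
theorem hyper_loop_spec : Claim_unchanged_hyper_loop := by
  intro n m _ hpre hnd
  show hyper_loop n m = hyper_loop_alt n m
  rcases eq_or_lt_of_le hpre with h0 | hn1
  · -- n = 0: both are []
    rw [← h0]
    have h01 : PySem.List.pyRange 0 1 1 = [0] := by decide
    simp [hyper_loop, hyper_loop_alt, h01]
  · have hn1 : 1 ≤ n := hn1
    rw [hyper_loop_eq_map n m hn1]
    by_cases hm : 0 < m
    · rw [alt_eq_map n m hn1 hm]
    · have hm : m ≤ 0 := by omega
      rw [alt_nonpos n m hm]
      have hp : m ^ n.toNat ≤ 0 := by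
        rcases eq_or_lt_of_le hm with hz | hneg
        · subst hz
          rw [zero_pow (by omega)]
        · have h2 : n % 2 = 1 := by
            rcases Int.emod_two_eq n with h2 | h2
            · exact absurd ⟨hneg, hn1, h2⟩ hnd
            · exact h2
          have hodd : Odd n.toNat := Nat.odd_iff.mpr (by omega)
          exact (Odd.pow_neg hodd hneg).le
      rw [show PySem.List.pyRange 0 (m ^ n.toNat) 1 = [] from by
        rw [PySem.List.pyRange_one]
        rw [show ((m ^ n.toNat - 0).toNat) = 0 from by omega]
        simp]
      rfl

theorem hyper_loop_tight : Claim_exact_hyper_loop := by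
  intro n m _ _ hD
  obtain ⟨hm, hn1, hev⟩ := hD
  rw [alt_nonpos n m (le_of_lt hm), hyper_loop_eq_map n m hn1]
  intro hcon
  have hp : 0 < m ^ n.toNat := by
    have hev' : Even n.toNat := Nat.even_iff.mpr (by omega)
    exact hev'.pow_pos (by omega)
  have := congrArg List.length hcon
  rw [List.length_map, PySem.List.length_pyRange_one] at this
  simp at this
  omega

theorem hyper_loop_changed : Claim_changed_hyper_loop := by
  unfold Claim_changed_hyper_loop; decide
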